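-- pv_equiv track=rewrite | github.com/Kulsoom-Mateen/Python-programs | cats_and_mouse.py | catAndMouse
-- ===== SOURCE A (Python) =====
-- def catAndMouse(x, y, z):
--     ans=()
--     if(x<z and y<z):
--         for i in range(x,z+1):
--             for j in range(y,z+1):
--                 if(i==z and j==z):
--                     ans="Mouse C"
--                     break
--                 elif(i==z):
--                     ans="Cat A"
--                     break
--                 elif(j==z):
--                     ans="Cat B"
--                     break
--                 i=i+1
--             break
--     elif(x<z and y>z):
--         for i in range(x,z+1):
--             for j in range(y,z-1,-1):
--                 if(i==z and j==z):
--                     ans="Mouse C"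
--                     break
--                 elif(i==z):
--                     ans="Cat A"
--                     break
--                 elif(j==z):
--                     ans="Cat B"
--                     break
--                 i=i+1
--             break
--     elif(x>z and y<z):
--         for i in range(x,z-1,-1):
--             for j in range(y,z+1):
--                 if(i==z and j==z):
--                     ans="Mouse C"
--                     break
--                 elif(i==z):
--                     ans="Cat A"
--                     break
--                 elif(j==z):
--                     ans="Cat B"
--                     break
--                 i=i-1
--             break
--     elif(x>z and y>z):
--         for i in range(x,z-1,-1):
--             for j in range(y,z-1,-1):
--                 if(i==z and j==z):
--                     ans="Mouse C"
--                     break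
--                 elif(i==z):
--                     ans="Cat A"
--                     break
--                 elif(j==z):
--                     ans="Cat B"
--                     break
--                 i=i-1
--             break
--     elif(x==z and y==z):
--         ans="Mouse C"
--     elif(x==z and y!=z):
--         ans="Cat A"
--     elif(x!=z and y==z):
--         ans="Cat B"
--     return ans
-- ===== SOURCE B (Python) =====
-- def catAndMouse(x, y, z):
--     dx = abs(x - z)
--     dy = abs(y - z)
--     if dx == dy:
--         return "Mouse C"
--     return "Cat A" if dx < dy else "Cat B"
-- ===== Notes on version B (the rewrite author's own statement) =====
-- stated objective: simpler
-- what changed: Replaced A's four-way case split with lockstep range walks by a direct closed-form comparison of the two absolute distances |x-z| and |y-z|.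
import Mathlib
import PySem

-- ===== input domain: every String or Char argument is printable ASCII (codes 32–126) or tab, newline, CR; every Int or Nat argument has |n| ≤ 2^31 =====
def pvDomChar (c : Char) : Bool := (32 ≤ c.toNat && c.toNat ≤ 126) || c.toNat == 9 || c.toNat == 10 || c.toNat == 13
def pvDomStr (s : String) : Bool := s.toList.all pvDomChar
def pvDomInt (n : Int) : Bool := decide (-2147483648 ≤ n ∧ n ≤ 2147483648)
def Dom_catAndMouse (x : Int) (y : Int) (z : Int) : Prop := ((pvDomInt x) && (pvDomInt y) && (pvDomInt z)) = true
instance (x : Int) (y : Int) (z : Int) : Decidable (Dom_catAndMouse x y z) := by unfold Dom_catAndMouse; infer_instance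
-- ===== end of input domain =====

-- B replaces A's lockstep range walks by a closed-form comparison of |x-z| and |y-z| (simpler; same return value).
-- ===== PORT A =====
-- Inner loop of each branch of A: Python's `for j in range(...)` iterates lazily, so the port
-- steps j by `dj` for `fuel` = len(range) iterations while i is mutated by `di` each iteration
-- (exact: same j sequence, same i updates); `none` = the loop exhausted without setting ans
-- (unreachable on Int inputs, where Python always returns a string).
def pvCMInner (z di dj : Int) : Nat → Int → Int → Option String
  | 0, _, _ => none
  | fuel+1, i, j =>
    if i = z ∧ j = z then some "Mouse C"
    else if i = z then some "Cat A"
    else if j = z then some "Cat B"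
    else pvCMInner z di dj fuel (i + di) (j + dj)

def catAndMouse (x : Int) (y : Int) (z : Int) : String :=
  if x < z ∧ y < z then (pvCMInner z 1 1 ((z+1) - y).toNat x y).getD ""
  else if x < z ∧ y > z then (pvCMInner z 1 (-1) (y - (z-1)).toNat x y).getD ""
  else if x > z ∧ y < z then (pvCMInner z (-1) 1 ((z+1) - y).toNat x y).getD ""
  else if x > z ∧ y > z then (pvCMInner z (-1) (-1) (y - (z-1)).toNat x y).getD ""
  else if x = z ∧ y = z then "Mouse C"
  else if x = z ∧ y ≠ z then "Cat A"
  else if x ≠ z ∧ y = z then "Cat B"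
  else ""  -- Python's `ans = ()`; unreachable for Int inputs

-- ===== PORT B =====
def catAndMouse_alt (x : Int) (y : Int) (z : Int) : String :=
  let dx := (x - z).natAbs
  let dy := (y - z).natAbs
  if dx = dy then "Mouse C"
  else if dx < dy then "Cat A" else "Cat B"

-- ===== PRECONDITION & SPEC =====
def Spec_catAndMouse (x : Int) (y : Int) (z : Int) (out : String) : Prop := out = catAndMouse_alt x y z
instance (x : Int) (y : Int) (z : Int) (out : String) : Decidable (Spec_catAndMouse x y z out) := by unfold Spec_catAndMouse; infer_instance

-- ===== CLAIM (what is proved, stated in full; the proofs are below) =====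
def Claim_equal_catAndMouse : Prop := ∀ (x : Int) (y : Int) (z : Int), Dom_catAndMouse x y z → Spec_catAndMouse x y z (catAndMouse x y z)

-- ===== LEMMAS AND PROOFS =====

-- closed-form verdict from the two distances (shape of catAndMouse_alt's body)
def pvVerdict (a b : Nat) : String :=
  if a = b then "Mouse C" else if a < b then "Cat A" else "Cat B"

theorem pvVerdict_shift (a b : Nat) (ha : 0 < a) (hb : 0 < b) :
    pvVerdict (a-1) (b-1) = pvVerdict a b := by
  unfold pvVerdict; split_ifs <;> first | rfl | omega

-- invariant: the walker sits on the side of z matching its step and walks toward z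
def pvIOk (z d w : Int) : Prop := (d = 1 ∧ w ≤ z) ∨ (d = -1 ∧ z ≤ w)

theorem pvIOk_step (z d w : Int) (h : pvIOk z d w) (hne : w ≠ z) : pvIOk z d (w + d) := by
  rcases h with ⟨h1, h2⟩ | ⟨h1, h2⟩ <;> subst h1
  · exact Or.inl ⟨rfl, by omega⟩
  · exact Or.inr ⟨rfl, by omega⟩

theorem pvIOk_natAbs (z d w : Int) (h : pvIOk z d w) (hne : w ≠ z) :
    ((w + d) - z).natAbs = (w - z).natAbs - 1 ∧ 0 < (w - z).natAbs := by
  rcases h with ⟨h1, h2⟩ | ⟨h1, h2⟩ <;> subst h1 <;> omega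

-- the lockstep walk, run for the full inner-range length, returns the distance verdict
theorem pvCMInner_run (z di dj : Int) : ∀ (m : Nat) (i j : Int), pvIOk z di i → pvIOk z dj j →
    (j - z).natAbs = m →
    pvCMInner z di dj (m+1) i j = some (pvVerdict (i - z).natAbs m) := by
  intro m
  induction m with
  | zero =>
    intro i j hi hj hm
    have hjz : j = z := by omega
    by_cases hiz : i = z
    · simp [pvCMInner, hiz, hjz, pvVerdict]
    · have h0 : (i - z).natAbs ≠ 0 := by omega
      simp only [pvCMInner, pvVerdict, hjz]
      split_ifs <;> first | rfl | omega
  | succ m ih =>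
    intro i j hi hj hm
    have hjne : j ≠ z := by omega
    by_cases hiz : i = z
    · simp only [pvCMInner, pvVerdict]
      split_ifs <;> first | rfl | omega
    · have hj' := pvIOk_natAbs z dj j hj hjne
      have hrec := ih (i + di) (j + dj) (pvIOk_step z di i hi hiz) (pvIOk_step z dj j hj hjne)
        (by omega)
      have hsh := pvIOk_natAbs z di i hi hiz
      have hstep : pvCMInner z di dj (m+1+1) i j = pvCMInner z di dj (m+1) (i + di) (j + dj) := by
        simp [pvCMInner, hiz, hjne]
      rw [hstep, hrec, hsh.1, ← pvVerdict_shift (i - z).natAbs (m + 1) hsh.2 (by omega)]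
      norm_num

theorem alt_eq_verdict (x y z : Int) :
    catAndMouse_alt x y z = pvVerdict (x - z).natAbs (y - z).natAbs := rfl

-- ===== VERDICT (by name: the statement is the Claim_ definition above) =====
theorem catAndMouse_spec : Claim_equal_catAndMouse := by
  intro x y z _
  unfold Spec_catAndMouse catAndMouse
  rw [alt_eq_verdict]
  split_ifs with h1 h2 h3 h4 h5 h6 h7
  · rw [(by omega : ((z+1) - y).toNat = (y - z).natAbs + 1),
        pvCMInner_run z 1 1 (y - z).natAbs x y (Or.inl ⟨rfl, by omega⟩) (Or.inl ⟨rfl, by omega⟩) rfl]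
    rfl
  · rw [(by omega : (y - (z-1)).toNat = (y - z).natAbs + 1),
        pvCMInner_run z 1 (-1) (y - z).natAbs x y (Or.inl ⟨rfl, by omega⟩) (Or.inr ⟨rfl, by omega⟩) rfl]
    rfl
  · rw [(by omega : ((z+1) - y).toNat = (y - z).natAbs + 1),
        pvCMInner_run z (-1) 1 (y - z).natAbs x y (Or.inr ⟨rfl, by omega⟩) (Or.inl ⟨rfl, by omega⟩) rfl]
    rfl
  · rw [(by omega : (y - (z-1)).toNat = (y - z).natAbs + 1),
        pvCMInner_run z (-1) (-1) (y - z).natAbs x y (Or.inr ⟨rfl, by omega⟩) (Or.inr ⟨rfl, by omega⟩) rfl]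
    rfl
  · unfold pvVerdict; split_ifs <;> first | rfl | omega
  · unfold pvVerdict; split_ifs <;> first | rfl | omega
  · unfold pvVerdict; split_ifs <;> first | rfl | omega
  · omega
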